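-- pv_equiv track=rewrite | github.com/tomshenry87/tools | mikrotik_version_check/mikrotik_firmware.py | get_routeros_version
-- ===== SOURCE A (Python) =====
-- def get_routeros_version(packages: list[dict]) -> str | None:
--     for pkg in packages:
--         if "routeros" in pkg["name"].lower():
--             return pkg["version"]
--     for pkg in packages:
--         if pkg["name"].lower() == "system":
--             return pkg["version"]
--     return None
-- ===== SOURCE B (Python) =====
-- def get_routeros_version(packages: list[dict]) -> str | None:
--     system_pkg = None
--     for pkg in packages:
--         name = pkg["name"].lower()
--         if "routeros" in name:
--             return pkg["version"]
--         if name == "system" and system_pkg is None: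
--             system_pkg = pkg
--     return system_pkg["version"] if system_pkg is not None else None
-- ===== Notes on version B (the rewrite author's own statement) =====
-- stated objective: alternative
-- what changed: Single pass that returns immediately on a routeros match and remembers the first 'system' package as a deferred fallback candidate, instead of A's two full scans over the list.
import Mathlib
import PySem

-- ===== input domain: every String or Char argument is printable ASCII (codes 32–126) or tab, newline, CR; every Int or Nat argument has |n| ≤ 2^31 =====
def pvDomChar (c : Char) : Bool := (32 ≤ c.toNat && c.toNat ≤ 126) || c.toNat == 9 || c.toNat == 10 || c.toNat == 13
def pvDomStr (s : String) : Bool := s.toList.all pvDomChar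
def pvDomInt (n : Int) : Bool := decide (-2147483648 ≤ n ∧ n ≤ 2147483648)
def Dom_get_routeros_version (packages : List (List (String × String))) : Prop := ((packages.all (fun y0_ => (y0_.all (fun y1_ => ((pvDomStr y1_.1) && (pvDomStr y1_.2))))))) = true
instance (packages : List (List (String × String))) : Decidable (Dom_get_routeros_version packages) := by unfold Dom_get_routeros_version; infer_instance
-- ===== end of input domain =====

-- B replaces A's two full scans by a single pass that remembers the first 'system'
-- package as a deferred fallback candidate (objective: alternative decomposition).

-- ===== PORT A =====
-- pkg[k]: first-match association-list lookup; a missing key raises KeyError in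
-- Python — those inputs are excluded by Pre_, so the "" default is never relied on.
def pvGet (pkg : List (String × String)) (k : String) : String :=
  ((pkg.find? (fun kv => kv.1 == k)).map Prod.snd).getD ""

-- "routeros" in pkg["name"].lower()
def pvIsRouteros (pkg : List (String × String)) : Bool :=
  PySem.Str.isIn "routeros" (PySem.Str.lower (pvGet pkg "name"))

-- pkg["name"].lower() == "system"
def pvIsSystem (pkg : List (String × String)) : Bool :=
  PySem.Str.lower (pvGet pkg "name") == "system"

-- A's first loop: return pkg["version"] of the first routeros package
def pvALoop1 : List (List (String × String)) → Option String
  | [] => none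
  | pkg :: rest => if pvIsRouteros pkg then some (pvGet pkg "version") else pvALoop1 rest

-- A's second loop: return pkg["version"] of the first 'system' package
def pvALoop2 : List (List (String × String)) → Option String
  | [] => none
  | pkg :: rest => if pvIsSystem pkg then some (pvGet pkg "version") else pvALoop2 rest

def get_routeros_version (packages : List (List (String × String))) : Option String :=
  match pvALoop1 packages with
  | some v => some v
  | none => pvALoop2 packages

-- ===== PORT B =====
-- B's single loop: sysCand carries the first 'system' package seen so far
def pvBLoop : List (List (String × String)) → Option (List (String × String)) → Option String
  | [], sysCand => sysCand.map (fun p => pvGet p "version")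
  | pkg :: rest, sysCand =>
    if pvIsRouteros pkg then some (pvGet pkg "version")
    else pvBLoop rest (if pvIsSystem pkg && sysCand.isNone then some pkg else sysCand)

def get_routeros_version_alt (packages : List (List (String × String))) : Option String :=
  pvBLoop packages none

-- ===== PRECONDITION & SPEC =====
-- Pre_ holds exactly where Python A returns normally: scanning in order, no package
-- lacks "name" before the first routeros match; that match (if any) has "version";
-- with no routeros match, the first 'system' package (if any) has "version".
def pvPreCheck (packages : List (List (String × String))) : Bool :=
  match packages.find? (fun p =>
      (p.find? (fun kv => kv.1 == "name")).isNone ||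
      PySem.Str.isIn "routeros" (PySem.Str.lower (((p.find? (fun kv => kv.1 == "name")).map Prod.snd).getD ""))) with
  | some p => (p.find? (fun kv => kv.1 == "name")).isSome && (p.find? (fun kv => kv.1 == "version")).isSome
  | none =>
    match packages.find? (fun p =>
        PySem.Str.lower (((p.find? (fun kv => kv.1 == "name")).map Prod.snd).getD "") == "system") with
    | some p => (p.find? (fun kv => kv.1 == "version")).isSome
    | none => true

def Pre_get_routeros_version (packages : List (List (String × String))) : Prop :=
  pvPreCheck packages = true

instance (packages : List (List (String × String))) : Decidable (Pre_get_routeros_version packages) := by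
  unfold Pre_get_routeros_version; infer_instance

def pvWitness_get_routeros_version : (List (List (String × String))) :=
  [[("name", "foo"), ("version", "1.0")], [("name", "RouterOS"), ("version", "7.1")]]

def Spec_get_routeros_version (packages : List (List (String × String))) (out : Option String) : Prop := out = get_routeros_version_alt packages
instance (packages : List (List (String × String))) (out : Option String) : Decidable (Spec_get_routeros_version packages out) := by unfold Spec_get_routeros_version; infer_instance

-- ===== CLAIM (what is proved, stated in full; the proofs are below) =====
def Claim_equal_get_routeros_version : Prop := ∀ (packages : List (List (String × String))), Dom_get_routeros_version packages → Pre_get_routeros_version packages → Spec_get_routeros_version packages (get_routeros_version packages)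

-- ===== LEMMAS AND PROOFS =====
-- Loop invariant: B's single pass with candidate c computes A's routeros scan first,
-- then falls back to c's version if c is set, else to A's system scan.
lemma pvBLoop_spec (l : List (List (String × String))) (c : Option (List (String × String))) :
    pvBLoop l c = match pvALoop1 l with
      | some v => some v
      | none => match c with
        | some p => some (pvGet p "version")
        | none => pvALoop2 l := by
  induction l generalizing c with
  | nil => cases c <;> simp [pvBLoop, pvALoop1, pvALoop2]
  | cons pkg rest ih =>
    cases hr : pvIsRouteros pkg with
    | true => simp [pvBLoop, pvALoop1, hr]
    | false =>
      cases c with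
      | some p => simp [pvBLoop, pvALoop1, hr, ih]
      | none =>
        cases hs : pvIsSystem pkg with
        | true => simp [pvBLoop, pvALoop1, pvALoop2, hr, hs, ih]
        | false => simp [pvBLoop, pvALoop1, pvALoop2, hr, hs, ih]

-- ===== VERDICT (by name: the statement is the Claim_ definition above) =====
theorem get_routeros_version_spec : Claim_equal_get_routeros_version := by
  intro packages _hDom _hPre
  unfold Spec_get_routeros_version get_routeros_version get_routeros_version_alt
  rw [pvBLoop_spec]
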